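-- pv_equiv track=rewrite | github.com/dennys246/synchronAI | src/synchronai/data/fnirs/quality_control.py | _cardiac_by_pair
-- ===== SOURCE A (Python) =====
-- from typing import Dict, List, Optional, Tuple
--
-- def _cardiac_by_pair(
--     cardiac_per_channel: Dict[str, bool],
-- ) -> Dict[str, bool]:
--     """Collapse per-channel cardiac results to per-pair (both wavelengths must pass)."""
--     pair_results: Dict[str, List[bool]] = {}
--     for ch_name, present in cardiac_per_channel.items():
--         parts = ch_name.rsplit(" ", 1)
--         pair_key = parts[0] if len(parts) == 2 else ch_name
--         pair_results.setdefault(pair_key, []).append(present)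
--     return {pair: all(vals) for pair, vals in pair_results.items()}
-- ===== SOURCE B (Python) =====
-- def _cardiac_by_pair(cardiac_per_channel):
--     """Collapse per-channel cardiac results to per-pair (both wavelengths must pass)."""
--     items = list(cardiac_per_channel.items())
--
--     def pair_key(ch_name):
--         head, sep, _tail = ch_name.rpartition(" ")
--         return head if sep else ch_name
--
--     ordered_pairs = list(dict.fromkeys(pair_key(ch) for ch, _ in items))
--     return {pair: all(v for ch, v in items if pair_key(ch) == pair)
--             for pair in ordered_pairs}
-- ===== Notes on version B (the rewrite author's own statement) =====
-- stated objective: alternative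
-- what changed: staged two-pass strategy: first build the ordered list of distinct pair keys (dict.fromkeys, rpartition-based key), then for each key do a nested scan over all items with all(); no per-pair accumulator dict is ever maintained during the item loop
import Mathlib
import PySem

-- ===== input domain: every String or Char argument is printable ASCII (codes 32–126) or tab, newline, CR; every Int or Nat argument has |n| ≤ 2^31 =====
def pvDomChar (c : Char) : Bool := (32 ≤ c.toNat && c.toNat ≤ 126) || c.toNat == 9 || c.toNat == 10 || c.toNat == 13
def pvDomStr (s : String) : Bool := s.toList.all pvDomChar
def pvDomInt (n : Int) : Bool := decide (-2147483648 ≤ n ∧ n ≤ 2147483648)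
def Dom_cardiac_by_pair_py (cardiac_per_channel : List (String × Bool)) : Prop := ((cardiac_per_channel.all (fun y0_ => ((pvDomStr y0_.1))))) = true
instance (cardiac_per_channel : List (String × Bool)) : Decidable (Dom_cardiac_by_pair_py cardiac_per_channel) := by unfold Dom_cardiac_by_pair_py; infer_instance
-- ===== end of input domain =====

-- B is a staged alternative: it first lists the distinct pair keys in order, then answers
-- each key by a nested all() scan over the items — no accumulator dict during the item loop.

-- ===== PORT A =====
-- hand port of s.rsplit(" ", 1): exact — splits at the LAST ' ' if any, else the whole string
def pyRsplitSpace1Aux : List Char → Option (List Char × List Char)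
  | [] => none
  | c :: rest =>
    match pyRsplitSpace1Aux rest with
    | some (b, a) => some (c :: b, a)
    | none => if c = ' ' then some ([], rest) else none

def pyRsplitSpace1 (s : String) : List String :=
  match pyRsplitSpace1Aux s.toList with
  | none => [s]
  | some (b, a) => [String.ofList b, String.ofList a]

-- parts = ch_name.rsplit(" ", 1); pair_key = parts[0] if len(parts) == 2 else ch_name
def pairKey (s : String) : String :=
  let parts := pyRsplitSpace1 s
  if parts.length == 2 then parts.headD s else s

def cardiac_by_pair_py (cardiac_per_channel : List (String × Bool)) : List (String × Bool) :=
  let pair_results : PySem.Dict String (List Bool) :=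
    cardiac_per_channel.foldl
      (fun d p => d.modify (pairKey p.1) [] (fun vals => vals ++ [p.2]))
      PySem.Dict.empty
  (pair_results.items.foldl
      (fun d q => d.insert q.1 (q.2.all id)) PySem.Dict.empty).items

-- ===== PORT B =====
-- hand port of ch_name.rpartition(" ")-based key: exact — the part before the LAST ' ' if
-- a ' ' occurs (sep nonempty), else the whole string; found by scanning the reversed chars
def pairKeyB (s : String) : String :=
  match s.toList.reverse.dropWhile (· ≠ ' ') with
  | [] => s
  | _ :: before_rev => String.ofList before_rev.reverse

def cardiac_by_pair_py_alt (cardiac_per_channel : List (String × Bool)) : List (String × Bool) :=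
  let ordered_pairs :=
    PySem.List.dedup (cardiac_per_channel.map (fun p => pairKeyB p.1))
  ordered_pairs.map (fun k =>
    (k, ((cardiac_per_channel.filter (fun p => pairKeyB p.1 == k)).map (·.2)).all id))

-- ===== PRECONDITION & SPEC =====
def Spec_cardiac_by_pair_py (cardiac_per_channel : List (String × Bool)) (out : List (String × Bool)) : Prop := out = cardiac_by_pair_py_alt cardiac_per_channel
instance (cardiac_per_channel : List (String × Bool)) (out : List (String × Bool)) : Decidable (Spec_cardiac_by_pair_py cardiac_per_channel out) := by unfold Spec_cardiac_by_pair_py; infer_instance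

-- ===== CLAIM (what is proved, stated in full; the proofs are below) =====
def Claim_equal_cardiac_by_pair_py : Prop := ∀ (cardiac_per_channel : List (String × Bool)), Dom_cardiac_by_pair_py cardiac_per_channel → Spec_cardiac_by_pair_py cardiac_per_channel (cardiac_by_pair_py cardiac_per_channel)

-- ===== LEMMAS AND PROOFS =====

-- A's rsplit-last-space helper, read off the reversed character list
theorem rsplitAux_reverse_dropWhile (l : List Char) :
    (match pyRsplitSpace1Aux l with
     | none => l.reverse.dropWhile (fun x => !decide (x = ' ')) = []
     | some (b, _) => l.reverse.dropWhile (fun x => !decide (x = ' ')) = ' ' :: b.reverse) := by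
  induction l with
  | nil => simp [pyRsplitSpace1Aux]
  | cons c rest ih =>
    simp only [pyRsplitSpace1Aux]
    cases h : pyRsplitSpace1Aux rest with
    | some p =>
      obtain ⟨b, a⟩ := p
      rw [h] at ih
      simp only at ih
      rw [List.reverse_cons, List.dropWhile_append, ih]
      simp
    | none =>
      rw [h] at ih
      simp only at ih
      rw [List.reverse_cons, List.dropWhile_append, ih]
      by_cases hc : c = ' ' <;> simp [hc, List.dropWhile]

-- the two hand ports of the pair key agree
theorem pairKeyB_eq_pairKey (s : String) : pairKeyB s = pairKey s := by
  unfold pairKeyB pairKey pyRsplitSpace1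
  have h := rsplitAux_reverse_dropWhile s.toList
  cases haux : pyRsplitSpace1Aux s.toList with
  | none =>
    rw [haux] at h
    simp only at h
    simp only [ne_eq, decide_not, h]
    simp
  | some p =>
    obtain ⟨b, a⟩ := p
    rw [haux] at h
    simp only at h
    simp only [ne_eq, decide_not, h]
    simp

theorem cardiac_by_pair_eq (l : List (String × Bool)) :
    cardiac_by_pair_py l = cardiac_by_pair_py_alt l := by
  unfold cardiac_by_pair_py cardiac_by_pair_py_alt
  simp only [pairKeyB_eq_pairKey]
  -- push the per-pair key into the list once on A's side
  have hA1 : l.foldl (fun d p => d.modify (pairKey p.1) [] (fun vals => vals ++ [p.2]))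
      (PySem.Dict.empty : PySem.Dict String (List Bool))
      = (l.map (fun p => (pairKey p.1, p.2))).foldl
          (fun d q => d.modify q.1 [] (fun vals => vals ++ [q.2])) PySem.Dict.empty := by
    rw [List.foldl_map]
  rw [hA1]
  set l' := l.map (fun p => (pairKey p.1, p.2)) with hl'
  set dA : PySem.Dict String (List Bool) :=
    l'.foldl (fun d q => d.modify q.1 [] (fun vals => vals ++ [q.2])) PySem.Dict.empty with hdA
  have hndA : dA.keys.Nodup := by
    rw [hdA]
    exact PySem.Dict.nodup_keys_foldl_modify_key l' (·.1) [] (fun d q vals => vals ++ [q.2]) _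
      PySem.Dict.nodup_keys_empty
  have hkA : dA.keys = PySem.Set.ofList (l'.map (·.1)) := by
    rw [hdA, PySem.Dict.keys_foldl_modify_key]
    simp [PySem.Dict.keys_empty, PySem.Set.update_nil_left]
  have hgA : ∀ c, dA.getD c [] = (l'.filter (fun q => q.1 == c)).map (·.2) := by
    intro c
    rw [hdA, PySem.Dict.getD_foldl_modify_append]
    simp [PySem.Dict.getD_empty]
  -- A's second pass over fresh distinct keys appends in order
  have hA2 : (dA.items.foldl (fun d q => d.insert q.1 (q.2.all id))
        (PySem.Dict.empty : PySem.Dict String Bool)).items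
      = [] ++ dA.items.map (fun q => (q.1, q.2.all id)) :=
    PySem.Dict.items_foldl_insert_fresh dA.items (fun q => q.1) (fun q => q.2.all id) _
      (fun a _ => PySem.Dict.contains_empty _) hndA
  rw [hA2, List.nil_append, PySem.Dict.items_eq_map_keys dA hndA [], hkA, List.map_map]
  -- B's key list is the same distinct-keys-in-order list
  have hB1 : PySem.List.dedup (l.map (fun p => pairKey p.1))
      = PySem.Set.ofList (l'.map (·.1)) := by
    rw [PySem.List.dedup_eq_ofList, hl', List.map_map]
    rfl
  rw [hB1]
  refine List.map_congr_left ?_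
  intro c _
  -- B's nested scan over l equals A's grouped list for key c
  have hfilt : (l.filter (fun p => pairKey p.1 == c)).map (·.2)
      = (l'.filter (fun q => q.1 == c)).map (·.2) := by
    rw [hl', List.filter_map, List.map_map]
    rfl
  simp [Function.comp, hgA, hfilt]

-- ===== VERDICT (by name: the statement is the Claim_ definition above) =====
theorem cardiac_by_pair_py_spec : Claim_equal_cardiac_by_pair_py := by
  intro l _
  unfold Spec_cardiac_by_pair_py
  exact cardiac_by_pair_eq l
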